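-- pv_equiv track=rewrite | github.com/tobijk/ecromedos | lib/plugins/verbatim.py | XHTML_verbatimString
-- ===== SOURCE A (Python) =====
-- def XHTML_verbatimString(string, tab_spaces):
-- 	'''Replaces tabs with spaces.'''
--
-- 	frame_start = 0
-- 	frame_end = 0
-- 	parts = []
-- 	length = len(string)
-- 	while frame_end < length:
-- 		ch = string[frame_end]
-- 		if ch == '\t':
-- 			parts.append(string[frame_start:frame_end])
-- 			parts.append(" " * tab_spaces)
-- 			frame_end += 1
-- 			frame_start = frame_end
-- 		else:
-- 			frame_end += 1
-- 		#end if
-- 	#end while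
--
-- 	if frame_start == 0: return None
-- 	if frame_end > frame_start: parts.append(string[frame_start:frame_end])
-- 	return "".join(parts)
-- ===== SOURCE B (Python) =====
-- def XHTML_verbatimString(string, tab_spaces):
--     '''Replaces tabs with spaces.'''
--     parts = string.split('\t')
--     if len(parts) == 1:
--         return None
--     return (" " * tab_spaces).join(parts)
-- ===== Notes on version B (the rewrite author's own statement) =====
-- stated objective: simpler
-- what changed: Replaced the explicit frame-boundary index scan that accumulates slices and space-runs into a parts list with a single split('\t') followed by a join on the space run, using len(parts)==1 as the no-tab sentinel.
import Mathlib
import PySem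

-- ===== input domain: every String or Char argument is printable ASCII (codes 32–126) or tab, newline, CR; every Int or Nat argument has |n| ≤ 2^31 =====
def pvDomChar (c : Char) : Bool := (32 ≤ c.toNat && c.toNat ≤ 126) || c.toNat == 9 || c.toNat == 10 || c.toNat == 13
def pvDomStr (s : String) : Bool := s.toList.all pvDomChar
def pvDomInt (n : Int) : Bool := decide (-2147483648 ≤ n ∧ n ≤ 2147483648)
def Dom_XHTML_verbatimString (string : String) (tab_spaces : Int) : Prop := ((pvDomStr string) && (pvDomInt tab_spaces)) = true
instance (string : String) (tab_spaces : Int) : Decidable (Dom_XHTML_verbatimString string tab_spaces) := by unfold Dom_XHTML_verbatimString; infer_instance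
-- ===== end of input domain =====

-- B replaces A's explicit frame-boundary index scan by split('\t') + join; equivalence of return values is proved.

-- ===== PORT A =====
-- the while loop: state (frame_start, frame_end, parts); returns the final (parts, frame_start)
def pvLoopA (s : List Char) (tab_spaces : Int) (fs fe : Nat) (parts : List (List Char)) :
    List (List Char) × Nat :=
  if h : fe < s.length then
    let ch := s[fe]
    if ch = '\t' then
      pvLoopA s tab_spaces (fe + 1) (fe + 1)
        (parts ++ [PySem.List.slice s (some (fs : Int)) (some (fe : Int)),
                   PySem.List.pyRepeat [' '] tab_spaces])
    else
      pvLoopA s tab_spaces fs (fe + 1) parts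
  else (parts, fs)
termination_by s.length - fe

def XHTML_verbatimString (string : String) (tab_spaces : Int) : Option String :=
  let s := string.toList
  let r := pvLoopA s tab_spaces 0 0 []
  if r.2 = 0 then none
  else
    let parts := if s.length > r.2 then
        r.1 ++ [PySem.List.slice s (some (r.2 : Int)) (some (s.length : Int))]
      else r.1
    some (String.ofList (PySem.Chars.join [] parts))

-- ===== PORT B =====
-- string.split('\t') for the one-char separator is List.splitOn '\t' on the code points
-- (exact: Python split on a single char, '' gives ['']); (' '*n).join is List.intercalate.
def XHTML_verbatimString_alt (string : String) (tab_spaces : Int) : Option String :=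
  let parts := string.toList.splitOn '\t'
  if parts.length == 1 then none
  else some (String.ofList ((PySem.List.pyRepeat [' '] tab_spaces).intercalate parts))

-- ===== PRECONDITION & SPEC =====
def Spec_XHTML_verbatimString (string : String) (tab_spaces : Int) (out : Option String) : Prop := out = XHTML_verbatimString_alt string tab_spaces
instance (string : String) (tab_spaces : Int) (out : Option String) : Decidable (Spec_XHTML_verbatimString string tab_spaces out) := by unfold Spec_XHTML_verbatimString; infer_instance

-- ===== CLAIM (what is proved, stated in full; the proofs are below) =====
def Claim_equal_XHTML_verbatimString : Prop := ∀ (string : String) (tab_spaces : Int), Dom_XHTML_verbatimString string tab_spaces → Spec_XHTML_verbatimString string tab_spaces (XHTML_verbatimString string tab_spaces)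

-- ===== LEMMAS AND PROOFS =====

-- the list of tab-free segments the loop is still to see from state (fs, fe)
def pvPieces (s : List Char) (fs fe : Nat) : List (List Char) :=
  ((s.drop fs).take (fe - fs) ++ ((s.drop fe).splitOn '\t').headI) ::
    ((s.drop fe).splitOn '\t').tail

theorem pv_headI_tail {α : Type} [Inhabited α] (q : List α) (h : q ≠ []) :
    q.headI :: q.tail = q := by
  cases q <;> simp_all

theorem pv_getLastI_cons_cons {α : Type} [Inhabited α] (a b : α) (t : List α) :
    (a :: b :: t).getLastI = (b :: t).getLastI := by
  simp [List.getLastI_eq_getLast?_getD]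

theorem pvLoopA_eq (s : List Char) (tab_spaces : Int) :
    ∀ fs fe (parts : List (List Char)), fs ≤ fe → fe ≤ s.length →
      pvLoopA s tab_spaces fs fe parts =
        (parts ++ (pvPieces s fs fe).dropLast.flatMap
            (fun p => [p, PySem.List.pyRepeat [' '] tab_spaces]),
         s.length - (pvPieces s fs fe).getLastI.length) ∧
      s.drop (s.length - (pvPieces s fs fe).getLastI.length) = (pvPieces s fs fe).getLastI ∧
      (s.length - (pvPieces s fs fe).getLastI.length = 0 ↔
        fs = 0 ∧ ((s.drop fe).splitOn '\t').length = 1) := by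
  intro fs fe parts hle hlen
  induction fs, fe, parts using pvLoopA.induct s tab_spaces with
  | case1 fs fe parts h ch htab ih =>
    -- ch = s[fe] = '\t'
    have hc : s[fe] = '\t' := htab
    have hdrop : s.drop fe = '\t' :: s.drop (fe + 1) := by
      rw [List.drop_eq_getElem_cons h, hc]
    have hsplit : (s.drop fe).splitOn '\t' = [] :: ((s.drop (fe + 1)).splitOn '\t') := by
      rw [hdrop]; simp [List.splitOn, List.splitOnP_cons]
    obtain ⟨q'h, q't, hq⟩ : ∃ a t, (s.drop (fe + 1)).splitOn '\t' = a :: t :=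
      List.exists_cons_of_ne_nil (List.splitOnP_ne_nil (fun x => x == '\t') (s.drop (fe + 1)))
    obtain ⟨ih1, ih2, ih3⟩ := ih (Nat.le_refl _) h
    have hPold : pvPieces s fs fe = ((s.drop fs).take (fe - fs)) :: (q'h :: q't) := by
      simp [pvPieces, hsplit, hq]
    have hPnew : pvPieces s (fe + 1) (fe + 1) = q'h :: q't := by
      simp only [pvPieces, Nat.sub_self, List.take_zero, List.nil_append, hq]
      exact pv_headI_tail _ (by simp)
    rw [pvLoopA, dif_pos h, if_pos htab, hPold]
    rw [hPnew] at ih1 ih2 ih3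
    have hgl : (((s.drop fs).take (fe - fs)) :: q'h :: q't).getLastI = (q'h :: q't).getLastI :=
      pv_getLastI_cons_cons _ _ _
    refine ⟨?_, ?_, ?_⟩
    · rw [ih1, hgl]
      have hslice : PySem.List.slice s (some (fs : Int)) (some (fe : Int)) =
          (s.drop fs).take (fe - fs) := PySem.List.slice_natCast s fs fe
      rw [hslice]
      congr 1
      cases q't with
      | nil => simp
      | cons b t => simp [List.dropLast]
    · rw [hgl]; exact ih2
    · rw [hgl, ih3, hsplit, hq]
      simp
  | case2 fs fe parts h ch htab ih =>
    -- ch = s[fe] ≠ '\t'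
    have hc : s[fe] ≠ '\t' := htab
    have hcb : (s[fe] == '\t') = false := by simp [hc]
    have hdrop : s.drop fe = s[fe] :: s.drop (fe + 1) := List.drop_eq_getElem_cons h
    have hsplit : (s.drop fe).splitOn '\t' =
        ((s.drop (fe + 1)).splitOn '\t').modifyHead (List.cons s[fe]) := by
      simp only [List.splitOn]
      rw [hdrop, List.splitOnP_cons, hcb]
      simp
    obtain ⟨q'h, q't, hq⟩ : ∃ a t, (s.drop (fe + 1)).splitOn '\t' = a :: t :=
      List.exists_cons_of_ne_nil (List.splitOnP_ne_nil (fun x => x == '\t') (s.drop (fe + 1)))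
    have hPsame : pvPieces s fs fe = pvPieces s fs (fe + 1) := by
      have htake : (s.drop fs).take (fe - fs) ++ [s[fe]] = (s.drop fs).take (fe + 1 - fs) := by
        have h2 : fe - fs < (s.drop fs).length := by
          rw [List.length_drop]; omega
        have hstep : (s.drop fs).take (fe - fs + 1) =
            (s.drop fs).take (fe - fs) ++ [(s.drop fs)[fe - fs]] := by
          rw [List.take_add_one]
          simp [List.getElem?_eq_getElem h2]
        have hv : (s.drop fs)[fe - fs] = s[fe] := by
          have hidx : (s.drop fs)[fe - fs]? = some s[fe] := by
            rw [List.getElem?_drop]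
            have harr : fs + (fe - fs) = fe := by omega
            rw [harr]
            exact List.getElem?_eq_getElem h
          rw [List.getElem?_eq_getElem h2] at hidx
          exact Option.some.inj hidx
        rw [hv] at hstep
        have harith : fe + 1 - fs = fe - fs + 1 := by omega
        rw [harith, hstep]
      simp only [pvPieces, hsplit, hq, List.modifyHead, List.headI, List.tail]
      rw [← htake, List.append_assoc]
      simp
    obtain ⟨ih1, ih2, ih3⟩ := ih (by omega) (by omega)
    rw [pvLoopA, dif_pos h, if_neg htab, hPsame]
    refine ⟨ih1, ih2, ?_⟩
    rw [ih3, hsplit, hq]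
    simp
  | case3 fs fe parts h =>
    -- fe = s.length
    have hfe : fe = s.length := by omega
    have hP : pvPieces s fs fe = [s.drop fs] := by
      simp [pvPieces, hfe, List.drop_length, List.splitOn, List.splitOnP_nil,
        List.take_of_length_le (by rw [List.length_drop]; omega : (s.drop fs).length ≤ fe - fs)]
    rw [pvLoopA, dif_neg h, hP]
    have hlast : ([s.drop fs] : List (List Char)).getLastI = s.drop fs := rfl
    rw [hlast]
    have hlen' : (s.drop fs).length = s.length - fs := List.length_drop ..
    refine ⟨?_, ?_, ?_⟩
    · have hdl : ([s.drop fs] : List (List Char)).dropLast = [] := rfl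
      rw [hdl, hlen']
      simp only [List.flatMap_nil, List.append_nil]
      congr 1
      omega
    · rw [hlen']
      have harr : s.length - (s.length - fs) = fs := by omega
      rw [harr]
    · rw [hlen', hfe]
      simp [List.drop_length, List.splitOn, List.splitOnP_nil]
      omega

theorem pv_intercalate_nil (l : List (List Char)) :
    (([] : List Char)).intercalate l = l.flatten := by
  induction l with
  | nil => rfl
  | cons a t ih => cases t <;> simp_all [List.intercalate]

theorem pv_join_pieces (sp : List Char) :
    ∀ (q : List (List Char)), q ≠ [] →
      (q.dropLast.flatMap (fun p => [p, sp]) ++ [q.getLastI]).flatten = sp.intercalate q := by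
  intro q
  induction q with
  | nil => intro h; exact absurd rfl h
  | cons a t ih =>
    intro _
    cases t with
    | nil => simp [List.getLastI, List.intercalate]
    | cons b t' =>
      have := ih (by simp)
      rw [pv_getLastI_cons_cons]
      have hic : sp.intercalate (a :: b :: t') = a ++ sp ++ sp.intercalate (b :: t') := by
        simp [List.intercalate]
      rw [hic, ← this]
      simp [List.dropLast]

-- ===== VERDICT (by name: the statement is the Claim_ definition above) =====
theorem XHTML_verbatimString_spec : Claim_equal_XHTML_verbatimString := by
  unfold Claim_equal_XHTML_verbatimString
  intro string tab_spaces _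
  unfold Spec_XHTML_verbatimString XHTML_verbatimString XHTML_verbatimString_alt
  set s := string.toList with hs
  have hq' : s.splitOn '\t' ≠ [] := List.splitOnP_ne_nil (fun x => x == '\t') s
  have hP0 : pvPieces s 0 0 = s.splitOn '\t' := by
    simp [pvPieces]
    exact pv_headI_tail _ hq'
  obtain ⟨h1, h2, h3⟩ := pvLoopA_eq s tab_spaces 0 0 [] (Nat.le_refl 0) (Nat.zero_le _)
  rw [hP0] at h1 h2 h3
  set q := s.splitOn '\t' with hqdef
  simp only [h1]
  by_cases hone : q.length = 1
  · have h0 : s.length - q.getLastI.length = 0 := by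
      rw [h3]; refine ⟨rfl, ?_⟩; simpa using hone
    simp [h0, hone]
  · have hfs : s.length - q.getLastI.length ≠ 0 := by
      intro h0
      exact hone ((h3.mp h0).2)
    have hbne : ¬ ((q.length == 1) = true) := by simp [hone]
    rw [if_neg hfs, if_neg hbne]
    set fs' := s.length - q.getLastI.length with hfs'
    have hlastlen : q.getLastI.length = s.length - fs' := by
      have := congrArg List.length h2
      rw [List.length_drop] at this
      omega
    have hjoin : ∀ parts : List (List Char),
        PySem.Chars.join [] parts = (([] : List Char)).intercalate parts := fun _ => rfl
    by_cases hlastnil : q.getLastI = []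
    · have hl0 : q.getLastI.length = 0 := by rw [hlastnil]; rfl
      have hgt : ¬ (s.length > fs') := by rw [hfs']; omega
      rw [if_neg hgt]
      congr 1
      rw [hjoin, pv_intercalate_nil,
        ← pv_join_pieces (PySem.List.pyRepeat [' '] tab_spaces) q hq', hlastnil]
      simp only [List.nil_append, List.flatten_append, List.flatten_cons, List.flatten_nil,
        List.append_nil]
    · have hgt : s.length > fs' := by
        have hp : 0 < q.getLastI.length := List.length_pos_of_ne_nil hlastnil
        omega
      have hslice : PySem.List.slice s (some (fs' : Int)) (some (s.length : Int)) = q.getLastI := by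
        rw [PySem.List.slice_natCast, ← h2]
        exact List.take_of_length_le (by rw [List.length_drop])
      rw [if_pos hgt]
      congr 1
      rw [hjoin, hslice, pv_intercalate_nil, List.nil_append,
        pv_join_pieces (PySem.List.pyRepeat [' '] tab_spaces) q hq']
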